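-- pv_equiv track=rewrite | github.com/gautamsharma3107/dev | Week1/Day6/03_sliding_window.py | max_profit_window
-- ===== SOURCE A (Python) =====
-- def max_profit_window(prices, window_size):
--     """
--     Find maximum profit with holding period constraint.
--     Time: O(n), Space: O(1)
--     """
--     if len(prices) < 2:
--         return 0
--
--     max_profit = 0
--
--     for i in range(len(prices) - 1):
--         # Look ahead up to window_size days
--         end = min(i + window_size, len(prices))
--         for j in range(i + 1, end):
--             profit = prices[j] - prices[i]
--             max_profit = max(max_profit, profit)
--
--     return max_profit
-- ===== SOURCE B (Python) =====
-- def max_profit_window(prices, window_size):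
--     """Sliding-window minimum via a monotonic deque (list + head index): O(n)."""
--     n = len(prices)
--     if n < 2 or window_size < 2:
--         return 0
--     best = 0
--     dq = []      # candidate buy indices; their prices strictly increase from dq[head] on
--     head = 0     # dq[head:] is the live deque
--     for j in range(1, n):
--         i = j - 1
--         while len(dq) > head and prices[dq[-1]] >= prices[i]:
--             dq.pop()
--         dq.append(i)
--         if dq[head] < j - window_size + 1:
--             head += 1
--         best = max(best, prices[j] - prices[dq[head]])
--     return best
-- ===== Notes on version B (the rewrite author's own statement) =====
-- stated objective: faster
-- what changed: Replaced the O(n*window) look-ahead double loop with a single pass keeping a monotonic deque (list plus head index) whose front is the sliding-window minimum buy price for each sell day.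
import Mathlib
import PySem

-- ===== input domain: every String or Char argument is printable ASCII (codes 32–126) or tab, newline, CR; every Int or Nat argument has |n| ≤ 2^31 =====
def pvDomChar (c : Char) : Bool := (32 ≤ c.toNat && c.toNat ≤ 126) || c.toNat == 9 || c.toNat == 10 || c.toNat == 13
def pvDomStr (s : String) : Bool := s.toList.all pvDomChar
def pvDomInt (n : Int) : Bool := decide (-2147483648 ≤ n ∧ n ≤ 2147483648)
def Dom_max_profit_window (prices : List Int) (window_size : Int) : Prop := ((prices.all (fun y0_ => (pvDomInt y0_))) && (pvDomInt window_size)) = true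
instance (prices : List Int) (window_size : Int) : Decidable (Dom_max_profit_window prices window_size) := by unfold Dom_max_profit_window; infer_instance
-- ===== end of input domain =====

-- B replaces A's O(n·window) look-ahead double loop by a single pass with a monotonic
-- deque (list + head index) whose front is the sliding-window minimum buy price; the
-- timing run measures B faster (asymptotic: O(n) vs O(n·window)).

-- ===== PORT A =====
def max_profit_window (prices : List Int) (window_size : Int) : Int :=
  if (prices.length : Int) < 2 then 0
  else
    (PySem.List.pyRange 0 ((prices.length : Int) - 1) 1).foldl
      (fun acc i =>
        let e := min (i + window_size) (prices.length : Int)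
        (PySem.List.pyRange (i + 1) e 1).foldl
          (fun acc2 j => max acc2 (PySem.List.pyGetD prices j 0 - PySem.List.pyGetD prices i 0)) acc) 0

-- ===== PORT B =====
-- while dq[head:] nonempty and prices[dq[-1]] >= prices[i]: dq.pop()
def altPop (prices : List Int) (head : Nat) (x : Int) (dq : List Int) : List Int :=
  if h : head < dq.length ∧ x ≤ PySem.List.pyGetD prices (PySem.List.pyGetD dq (-1) 0) 0
  then altPop prices head x dq.dropLast
  else dq
termination_by dq.length
decreasing_by
  have hne : dq ≠ [] := by rintro rfl; simp at h
  have := List.length_pos_iff.mpr hne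
  simp [List.length_dropLast]; omega

def max_profit_window_alt (prices : List Int) (window_size : Int) : Int :=
  if (prices.length : Int) < 2 ∨ window_size < 2 then 0
  else
    (PySem.List.pyRange 1 (prices.length : Int) 1).foldl
      (fun (s : Int × List Int × Nat) j =>
        let best := s.1
        let dq := s.2.1
        let head := s.2.2
        let i := j - 1
        let dq := altPop prices head (PySem.List.pyGetD prices i 0) dq
        let dq := dq ++ [i]
        let head := if PySem.List.pyGetD dq (head : Int) 0 < j - window_size + 1 then head + 1 else head
        let best := max best (PySem.List.pyGetD prices j 0 -
                      PySem.List.pyGetD prices (PySem.List.pyGetD dq (head : Int) 0) 0)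
        (best, dq, head)) (0, [], 0)
    |>.1

-- ===== PRECONDITION & SPEC =====
def Spec_max_profit_window (prices : List Int) (window_size : Int) (out : Int) : Prop := out = max_profit_window_alt prices window_size
instance (prices : List Int) (window_size : Int) (out : Int) : Decidable (Spec_max_profit_window prices window_size out) := by unfold Spec_max_profit_window; infer_instance

-- ===== CLAIM (what is proved, stated in full; the proofs are below) =====
def Claim_equal_max_profit_window : Prop := ∀ (prices : List Int) (window_size : Int), Dom_max_profit_window prices window_size → Spec_max_profit_window prices window_size (max_profit_window prices window_size)

-- ===== LEMMAS AND PROOFS =====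

-- prices[i] as the port reads it
def pv (prices : List Int) (i : Int) : Int := PySem.List.pyGetD prices i 0

-- minimum price over the buy window [max 0 (j-w+1), j-1] for sell day j
def winMin (prices : List Int) (w j : Int) : Int :=
  ((PySem.List.pyRange (max 0 (j - w + 1)) j 1).map (pv prices)).foldl min (pv prices (j - 1))

-- the loop body of max_profit_window_alt, named for the proofs
def bStep (prices : List Int) (window_size : Int) (s : Int × List Int × Nat) (j : Int) :
    Int × List Int × Nat :=
  let best := s.1
  let dq := s.2.1
  let head := s.2.2
  let i := j - 1
  let dq := altPop prices head (PySem.List.pyGetD prices i 0) dq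
  let dq := dq ++ [i]
  let head := if PySem.List.pyGetD dq (head : Int) 0 < j - window_size + 1 then head + 1 else head
  let best := max best (PySem.List.pyGetD prices j 0 -
                PySem.List.pyGetD prices (PySem.List.pyGetD dq (head : Int) 0) 0)
  (best, dq, head)

-- deque invariant before processing day j
def DqInv (prices : List Int) (w j : Int) (s : Int × List Int × Nat) : Prop :=
  s.2.2 ≤ s.2.1.length ∧
  (s.2.1.drop s.2.2).Pairwise (· < ·) ∧
  (s.2.1.drop s.2.2).Pairwise (fun a b => pv prices a < pv prices b) ∧
  (∀ k ∈ s.2.1.drop s.2.2, max 0 (j - w) ≤ k ∧ k ≤ j - 2) ∧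
  (∀ i', max 0 (j - w) ≤ i' → i' ≤ j - 2 →
    ∃ k ∈ s.2.1.drop s.2.2, i' ≤ k ∧ pv prices k ≤ pv prices i')

lemma winMin_le (prices : List Int) (w j i : Int) (hi : max 0 (j - w + 1) ≤ i) (hi2 : i < j) :
    winMin prices w j ≤ pv prices i := by
  have hm : pv prices i ∈ (PySem.List.pyRange (max 0 (j - w + 1)) j 1).map (pv prices) :=
    List.mem_map_of_mem (PySem.List.mem_pyRange_one.mpr ⟨hi, hi2⟩)
  exact (PySem.List.foldl_min_le _ _).2 _ hm

lemma winMin_attained (prices : List Int) (w j : Int) (hw : 2 ≤ w) (hj : 1 ≤ j) :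
    ∃ i, max 0 (j - w + 1) ≤ i ∧ i < j ∧ pv prices i = winMin prices w j := by
  rcases PySem.List.foldl_min_mem
      ((PySem.List.pyRange (max 0 (j - w + 1)) j 1).map (pv prices)) (pv prices (j - 1)) with h | h
  · exact ⟨j - 1, by omega, by omega, h.symm⟩
  · obtain ⟨i, hi, hpi⟩ := List.mem_map.mp h
    obtain ⟨hi1, hi2⟩ := PySem.List.mem_pyRange_one.mp hi
    exact ⟨i, hi1, hi2, hpi⟩

lemma altPop_spec (prices : List Int) (head : Nat) (x : Int) (dq : List Int) :
    ∃ rest : List Int, dq = altPop prices head x dq ++ rest ∧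
      (∀ y ∈ rest, x ≤ pv prices y) ∧
      (head ≤ dq.length → head ≤ (altPop prices head x dq).length) ∧
      ((altPop prices head x dq).length ≤ head ∨
        ∀ h2 : altPop prices head x dq ≠ [],
          pv prices ((altPop prices head x dq).getLast h2) < x) := by
  fun_induction altPop prices head x dq with
  | case1 dq h ih =>
      obtain ⟨rest, hsplit, hrest, hlen, hstop⟩ := ih
      have hne : dq ≠ [] := by rintro rfl; simp at h
      refine ⟨rest ++ [dq.getLast hne], ?_, ?_, ?_, hstop⟩
      · conv_lhs => rw [← dq.dropLast_concat_getLast hne]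
        rw [← List.append_assoc, ← hsplit]
      · intro y hy
        rcases List.mem_append.mp hy with hy | hy
        · exact hrest y hy
        · simp at hy; subst hy
          have h2 := h.2
          rwa [PySem.List.pyGetD_neg_one dq 0 hne] at h2
      · intro _
        exact hlen (by have := h.1; simp [List.length_dropLast]; omega)
  | case2 dq h =>
      refine ⟨[], by simp, by simp, fun h1 => h1, ?_⟩
      rcases Decidable.em (dq.length ≤ head) with hl | hl
      · exact Or.inl hl
      · right
        intro h2
        rcases Decidable.em (head < dq.length ∧ x ≤ PySem.List.pyGetD prices (PySem.List.pyGetD dq (-1) 0) 0) with hc | hc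
        · exact absurd hc h
        · have : ¬ x ≤ PySem.List.pyGetD prices (PySem.List.pyGetD dq (-1) 0) 0 := by
            rcases Decidable.em (x ≤ PySem.List.pyGetD prices (PySem.List.pyGetD dq (-1) 0) 0) with h3 | h3
            · exact absurd ⟨by omega, h3⟩ h
            · exact h3
          rw [PySem.List.pyGetD_neg_one dq 0 h2] at this
          unfold pv
          omega

lemma pairwise_le_getLast {l : List Int} {R : Int → Int → Prop} (hp : l.Pairwise R)
    (hne : l ≠ []) : ∀ k ∈ l, k = l.getLast hne ∨ R k (l.getLast hne) := by
  induction l with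
  | nil => simp
  | cons a t ih =>
    intro k hk
    cases t with
    | nil => simp at hk; subst hk; left; rfl
    | cons b u =>
      rw [List.getLast_cons (by simp)]
      rcases List.mem_cons.mp hk with rfl | hk'
      · exact Or.inr ((List.pairwise_cons.mp hp).1 _ (List.getLast_mem _))
      · exact ih (List.pairwise_cons.mp hp).2 (by simp) k hk'

-- dq[head] is the head of dq[head:]
lemma pyGetD_head_drop (l : List Int) (hd : Nat) (f : Int) (t : List Int)
    (h : l.drop hd = f :: t) : PySem.List.pyGetD l (hd : Int) 0 = f := by
  have hlt : hd < l.length := by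
    by_contra hc
    rw [List.drop_eq_nil_of_le (by omega)] at h
    cases h
  rw [PySem.List.pyGetD_natCast, List.getD_eq_getElem _ _ hlt]
  have h0 := List.getElem_drop (xs := l) (i := hd) (j := 0) (h := by simp [h])
  simp [h] at h0
  simpa using h0.symm

-- the front of the live deque carries the window minimum for sell day j
lemma front_min (prices : List Int) (w j : Int) (hw : 2 ≤ w) (hj : 1 ≤ j) (f : Int) (t : List Int)
    (hpv : (f :: t).Pairwise (fun a b => pv prices a < pv prices b))
    (hbnd : ∀ k ∈ f :: t, max 0 (j + 1 - w) ≤ k ∧ k ≤ j - 1)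
    (hcov : ∀ i', max 0 (j + 1 - w) ≤ i' → i' ≤ j - 1 →
      ∃ k ∈ f :: t, i' ≤ k ∧ pv prices k ≤ pv prices i') :
    pv prices f = winMin prices w j := by
  have hfw := hbnd f (by simp)
  have hle : winMin prices w j ≤ pv prices f :=
    winMin_le prices w j f (by omega) (by omega)
  refine le_antisymm ?_ hle
  obtain ⟨i0, hi0, hi0', hpi0⟩ := winMin_attained prices w j hw hj
  obtain ⟨k, hk, hik, hpk⟩ := hcov i0 (by omega) (by omega)
  have hfk : pv prices f ≤ pv prices k := by
    rcases List.mem_cons.mp hk with rfl | hk'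
    · exact le_refl _
    · exact le_of_lt ((List.pairwise_cons.mp hpv).1 _ hk')
  calc pv prices f ≤ pv prices k := hfk
    _ ≤ pv prices i0 := hpk
    _ = winMin prices w j := hpi0

lemma bStep_inv (prices : List Int) (w j : Int) (s : Int × List Int × Nat)
    (hw : 2 ≤ w) (hj : 1 ≤ j) (hInv : DqInv prices w j s) :
    (bStep prices w s j).1 = max s.1 (pv prices j - winMin prices w j) ∧
      DqInv prices w (j + 1) (bStep prices w s j) := by
  obtain ⟨best, dq0, head⟩ := s
  obtain ⟨h1, hp1, hp2, hbnd, hcov⟩ := hInv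
  dsimp only at h1 hp1 hp2 hbnd hcov
  simp only [bStep]
  set x := PySem.List.pyGetD prices (j - 1) 0 with hxdef
  obtain ⟨rest, hsplit, hrest, hlenf, hstop⟩ := altPop_spec prices head x dq0
  set r := altPop prices head x dq0 with hrdef
  have hlen : head ≤ r.length := hlenf h1
  have hlive : dq0.drop head = r.drop head ++ rest := by
    rw [hsplit, List.drop_append_of_le_length hlen]
  have hsubR : ∀ k ∈ r.drop head, k ∈ dq0.drop head := by
    intro k hk; rw [hlive]; exact List.mem_append_left _ hk
  have hbndR : ∀ k ∈ r.drop head, max 0 (j - w) ≤ k ∧ k ≤ j - 2 :=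
    fun k hk => hbnd k (hsubR k hk)
  have hpR1 : (r.drop head).Pairwise (· < ·) := by
    rw [hlive] at hp1; exact (List.pairwise_append.mp hp1).1
  have hpR2 : (r.drop head).Pairwise (fun a b => pv prices a < pv prices b) := by
    rw [hlive] at hp2; exact (List.pairwise_append.mp hp2).1
  have hvlt : ∀ k ∈ r.drop head, pv prices k < x := by
    intro k hk
    have hdne : r.drop head ≠ [] := by intro hnil; rw [hnil] at hk; cases hk
    have hRne : r ≠ [] := by intro h'; rw [h'] at hdne; simp at hdne
    have hlenR : head < r.length := by
      by_contra hcon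
      exact hdne (List.drop_eq_nil_of_le (by omega))
    have hstop' : pv prices (r.getLast hRne) < x := by
      rcases hstop with hs | hs
      · omega
      · exact hs hRne
    have hgl : r.getLast hRne = (r.drop head).getLast hdne := by
      have h₁ : r.take head ++ r.drop head ≠ [] := by
        rw [List.take_append_drop]; exact hRne
      calc r.getLast hRne = (r.take head ++ r.drop head).getLast h₁ := by
            congr 1
            exact (List.take_append_drop head r).symm
        _ = (r.drop head).getLast hdne := List.getLast_append_of_ne_nil h₁ hdne
    rcases pairwise_le_getLast hpR2 hdne k hk with heq | hlt
    · rw [heq, ← hgl]; exact hstop'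
    · calc pv prices k < pv prices ((r.drop head).getLast hdne) := hlt
        _ = pv prices (r.getLast hRne) := by rw [hgl]
        _ < x := hstop'
  have hlive2 : (r ++ [j - 1]).drop head = r.drop head ++ [j - 1] :=
    List.drop_append_of_le_length hlen
  obtain ⟨f0, t2, hft⟩ := List.exists_cons_of_ne_nil (l := r.drop head ++ [j - 1]) (by simp)
  have hlive2' : (r ++ [j - 1]).drop head = f0 :: t2 := by rw [hlive2, hft]
  have hfront := pyGetD_head_drop _ _ _ _ hlive2'
  have hP1 : (f0 :: t2).Pairwise (· < ·) := by
    rw [← hft]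
    refine List.pairwise_append.mpr ⟨hpR1, by simp, ?_⟩
    intro a ha b hb
    simp at hb; subst hb
    have := hbndR a ha; omega
  have hP2 : (f0 :: t2).Pairwise (fun a b => pv prices a < pv prices b) := by
    rw [← hft]
    refine List.pairwise_append.mpr ⟨hpR2, by simp, ?_⟩
    intro a ha b hb
    simp at hb; subst hb
    exact hvlt a ha
  have hB : ∀ k ∈ f0 :: t2, max 0 (j - w) ≤ k ∧ k ≤ j - 1 := by
    rw [← hft]
    intro k hk
    rcases List.mem_append.mp hk with hk' | hk'
    · have := hbndR k hk'; omega
    · simp at hk'; omega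
  have hj1mem2 : j - 1 ∈ f0 :: t2 := by rw [← hft]; simp
  have hC2 : ∀ i', max 0 (j + 1 - w) ≤ i' → i' ≤ j - 1 →
      ∃ k ∈ f0 :: t2, i' ≤ k ∧ pv prices k ≤ pv prices i' := by
    intro i' hlo hhi
    rcases eq_or_lt_of_le hhi with heq | hlt
    · exact ⟨j - 1, hj1mem2, by omega, by rw [heq]⟩
    · obtain ⟨k, hk, hik, hpk⟩ := hcov i' (by omega) (by omega)
      rw [hlive] at hk
      rcases List.mem_append.mp hk with hk' | hk'
      · exact ⟨k, by rw [← hft]; exact List.mem_append_left _ hk', hik, hpk⟩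
      · refine ⟨j - 1, hj1mem2, by omega, ?_⟩
        exact le_trans (hrest k hk') hpk
  by_cases hc : PySem.List.pyGetD (r ++ [j - 1]) (head : Int) 0 < j - w + 1
  · -- expired front: pop it
    rw [if_pos hc]
    have hf0lt : f0 < j - w + 1 := by rwa [hfront] at hc
    have hj1t2 : j - 1 ∈ t2 := by
      rcases List.mem_cons.mp hj1mem2 with h' | h'
      · omega
      · exact h'
    have ht2ne : t2 ≠ [] := by intro hnil; rw [hnil] at hj1t2; cases hj1t2
    obtain ⟨f1, t3, hft2⟩ := List.exists_cons_of_ne_nil ht2ne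
    have hlive3 : (r ++ [j - 1]).drop (head + 1) = t2 := by
      rw [← List.drop_drop, hlive2', List.drop_one, List.tail_cons]
    have hlive3' : (r ++ [j - 1]).drop (head + 1) = f1 :: t3 := by rw [hlive3, hft2]
    have hfront' := pyGetD_head_drop _ _ _ _ hlive3'
    have hP1' : (f1 :: t3).Pairwise (· < ·) := by
      rw [← hft2]; exact (List.pairwise_cons.mp hP1).2
    have hP2' : (f1 :: t3).Pairwise (fun a b => pv prices a < pv prices b) := by
      rw [← hft2]; exact (List.pairwise_cons.mp hP2).2
    have hB' : ∀ k ∈ f1 :: t3, max 0 (j + 1 - w) ≤ k ∧ k ≤ j - 1 := by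
      rw [← hft2]
      intro k hk
      have hkb := hB k (List.mem_cons_of_mem _ hk)
      have hgt : f0 < k := (List.pairwise_cons.mp hP1).1 k hk
      have hf0b := hB f0 (by simp)
      omega
    have hC' : ∀ i', max 0 (j + 1 - w) ≤ i' → i' ≤ j - 1 →
        ∃ k ∈ f1 :: t3, i' ≤ k ∧ pv prices k ≤ pv prices i' := by
      rw [← hft2]
      intro i' hlo hhi
      obtain ⟨k, hk, hik, hpk⟩ := hC2 i' hlo hhi
      rcases List.mem_cons.mp hk with rfl | hk'
      · omega
      · exact ⟨k, hk', hik, hpk⟩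
    have hwm : pv prices f1 = winMin prices w j := by
      rw [← hft2] at hP2' hB' hC'
      rw [hft2] at hP2' hB' hC'
      exact front_min prices w j hw hj f1 t3 hP2' hB' hC'
    constructor
    · rw [hfront', ← hwm]
      rfl
    · refine ⟨?_, ?_, ?_, ?_, ?_⟩ <;> dsimp only
      · simp; omega
      · rw [hlive3']; exact hP1'
      · rw [hlive3']; exact hP2'
      · rw [hlive3']
        intro k hk
        have := hB' k hk; omega
      · rw [hlive3']
        intro i' hlo hhi
        exact hC' i' (by omega) (by omega)
  · -- front still inside the window
    rw [if_neg hc]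
    have hf0ge : j - w + 1 ≤ f0 := by
      rw [hfront] at hc; omega
    have hB' : ∀ k ∈ f0 :: t2, max 0 (j + 1 - w) ≤ k ∧ k ≤ j - 1 := by
      intro k hk
      have hkb := hB k hk
      have hge : f0 ≤ k := by
        rcases List.mem_cons.mp hk with rfl | hk'
        · exact le_refl _
        · exact le_of_lt ((List.pairwise_cons.mp hP1).1 k hk')
      omega
    have hwm : pv prices f0 = winMin prices w j := front_min prices w j hw hj f0 t2 hP2 hB' hC2
    constructor
    · rw [hfront, ← hwm]
      rfl
    · refine ⟨?_, ?_, ?_, ?_, ?_⟩ <;> dsimp only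
      · simp; omega
      · rw [hlive2']; exact hP1
      · rw [hlive2']; exact hP2
      · rw [hlive2']
        intro k hk
        have := hB' k hk; omega
      · rw [hlive2']
        intro i' hlo hhi
        exact hC2 i' (by omega) (by omega)

lemma fold_bStep (prices : List Int) (w : Int) (hw : 2 ≤ w) :
    ∀ (m : Nat) (j : Int) (s : Int × List Int × Nat), 1 ≤ j →
      (((prices.length : Int) - j).toNat = m) → DqInv prices w j s →
      ((PySem.List.pyRange j (prices.length : Int) 1).foldl (bStep prices w) s).1 =
        (PySem.List.pyRange j (prices.length : Int) 1).foldl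
          (fun acc j' => max acc (pv prices j' - winMin prices w j')) s.1 := by
  intro m
  induction m with
  | zero =>
    intro j s hj hm hInv
    rw [PySem.List.pyRange_one_eq_nil (by omega)]
    simp
  | succ m ih =>
    intro j s hj hm hInv
    have hjn : j < (prices.length : Int) := by omega
    rw [PySem.List.pyRange_one_cons hjn]
    simp only [List.foldl_cons]
    obtain ⟨hbest, hinv'⟩ := bStep_inv prices w j s hw hj hInv
    rw [ih (j + 1) _ (by omega) (by omega) hinv', hbest]

-- A as a single max-fold over the list of all admissible profits, i-major order
lemma A_char (prices : List Int) (w : Int) (hn : 2 ≤ (prices.length : Int)) :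
    max_profit_window prices w =
      ((PySem.List.pyRange 0 ((prices.length : Int) - 1) 1).flatMap
        (fun i => (PySem.List.pyRange (i + 1) (min (i + w) (prices.length : Int)) 1).map
          (fun j => pv prices j - pv prices i))).foldl max 0 := by
  unfold max_profit_window
  rw [if_neg (by omega), List.foldl_flatMap]
  refine PySem.List.foldl_congr_mem _ _ _ _ ?_
  intro acc i _
  exact (List.foldl_map).symm

lemma core (prices : List Int) (w : Int) (hn : 2 ≤ (prices.length : Int)) (hw : 2 ≤ w) :
    ((PySem.List.pyRange 0 ((prices.length : Int) - 1) 1).flatMap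
        (fun i => (PySem.List.pyRange (i + 1) (min (i + w) (prices.length : Int)) 1).map
          (fun j => pv prices j - pv prices i))).foldl max 0 =
      ((PySem.List.pyRange 1 (prices.length : Int) 1).map
        (fun j => pv prices j - winMin prices w j)).foldl max 0 := by
  apply le_antisymm
  · rcases PySem.List.foldl_max_mem
        ((PySem.List.pyRange 0 ((prices.length : Int) - 1) 1).flatMap
          (fun i => (PySem.List.pyRange (i + 1) (min (i + w) (prices.length : Int)) 1).map
            (fun j => pv prices j - pv prices i))) 0 with h0 | hmem
    · rw [h0]
      exact (PySem.List.le_foldl_max _ _).1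
    · obtain ⟨i, hiR, hx⟩ := List.mem_flatMap.mp hmem
      obtain ⟨j, hjR, hxx⟩ := List.mem_map.mp hx
      obtain ⟨hi0, hi1⟩ := PySem.List.mem_pyRange_one.mp hiR
      obtain ⟨hj0, hj1⟩ := PySem.List.mem_pyRange_one.mp hjR
      obtain ⟨hja, hjb⟩ := lt_min_iff.mp hj1
      rw [← hxx]
      have h1 : winMin prices w j ≤ pv prices i :=
        winMin_le prices w j i (max_le_iff.mpr ⟨by omega, by omega⟩) (by omega)
      have h2 : pv prices j - winMin prices w j ∈
          (PySem.List.pyRange 1 (prices.length : Int) 1).map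
            (fun j => pv prices j - winMin prices w j) :=
        List.mem_map_of_mem (PySem.List.mem_pyRange_one.mpr ⟨by omega, by omega⟩)
      calc pv prices j - pv prices i ≤ pv prices j - winMin prices w j := by omega
        _ ≤ _ := (PySem.List.le_foldl_max _ _).2 _ h2
  · rcases PySem.List.foldl_max_mem
        ((PySem.List.pyRange 1 (prices.length : Int) 1).map
          (fun j => pv prices j - winMin prices w j)) 0 with h0 | hmem
    · rw [h0]
      exact (PySem.List.le_foldl_max _ _).1
    · obtain ⟨j, hjR, hxx⟩ := List.mem_map.mp hmem
      obtain ⟨hj0, hj1⟩ := PySem.List.mem_pyRange_one.mp hjR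
      obtain ⟨i, hi0, hi1, hpi⟩ := winMin_attained prices w j hw hj0
      have h0i : (0 : Int) ≤ i := le_trans (le_max_left 0 (j - w + 1)) hi0
      have h1i : j - w + 1 ≤ i := le_trans (le_max_right 0 (j - w + 1)) hi0
      rw [← hxx, ← hpi]
      have hmemA : pv prices j - pv prices i ∈
          (PySem.List.pyRange 0 ((prices.length : Int) - 1) 1).flatMap
            (fun i => (PySem.List.pyRange (i + 1) (min (i + w) (prices.length : Int)) 1).map
              (fun j => pv prices j - pv prices i)) :=
        List.mem_flatMap.mpr ⟨i, PySem.List.mem_pyRange_one.mpr ⟨by omega, by omega⟩,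
          List.mem_map_of_mem (PySem.List.mem_pyRange_one.mpr
            ⟨by omega, lt_min_iff.mpr ⟨by omega, by omega⟩⟩)⟩
      exact (PySem.List.le_foldl_max _ _).2 _ hmemA

-- ===== VERDICT (by name: the statement is the Claim_ definition above) =====
theorem max_profit_window_spec : Claim_equal_max_profit_window := by
  intro prices w _
  show max_profit_window prices w = max_profit_window_alt prices w
  by_cases hn : (prices.length : Int) < 2
  · unfold max_profit_window max_profit_window_alt
    rw [if_pos hn, if_pos (Or.inl hn)]
  · by_cases hw : w < 2
    · unfold max_profit_window max_profit_window_alt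
      rw [if_neg hn, if_pos (Or.inr hw)]
      have hconst : ∀ (l : List Int) (a : Int), List.foldl (fun (a : Int) (_ : Int) => a) a l = a := by
        intro l
        induction l with
        | nil => simp
        | cons b t ih => intro a; rw [List.foldl_cons]; exact ih a
      rw [PySem.List.foldl_congr_mem _ _ (fun (a : Int) (_ : Int) => a) _ ?_, hconst]
      intro acc i _
      have : PySem.List.pyRange (i + 1) (min (i + w) (prices.length : Int)) 1 = [] :=
        PySem.List.pyRange_one_eq_nil (by omega)
      simp only [this, List.foldl_nil]
    · rw [not_lt] at hn hw
      have hB : max_profit_window_alt prices w =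
          ((PySem.List.pyRange 1 (prices.length : Int) 1).foldl (bStep prices w)
            ((0 : Int), ([] : List Int), (0 : Nat))).1 := by
        unfold max_profit_window_alt bStep
        rw [if_neg (by rw [not_or, not_lt, not_lt]; exact ⟨hn, hw⟩)]
      rw [A_char prices w hn, hB,
        fold_bStep prices w hw ((prices.length : Int) - 1).toNat 1 _ (by omega) (by omega) ?_]
      · rw [core prices w hn hw]
        exact List.foldl_map
      · unfold DqInv
        refine ⟨by simp, by simp, by simp, by simp, ?_⟩
        intro i' h1 h2; simp at h1 h2 ⊢; omega
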